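-- pv_equiv track=rewrite | github.com/Zhakupovaadiya/homework- | lab 1/main.py | sort_dict_by_value_length
-- ===== SOURCE A (Python) =====
-- def sort_dict_by_value_length(d):
--     items = list(d.items())
--     n = len(items)
--     for i in range(n):
--         for j in range(n - i - 1):
--             if (len(items[j][1]) > len(items[j+1][1]) or
--                (len(items[j][1]) == len(items[j+1][1]) and items[j][0] > items[j+1][0])):
--                 items[j], items[j+1] = items[j+1], items[j]
--     return items
-- ===== SOURCE B (Python) =====
-- def sort_dict_by_value_length(d):
--     # Bucket index: value-length -> items with that length, in insertion order.
--     buckets = {}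
--     for k, v in d.items():
--         buckets.setdefault(len(v), []).append((k, v))
--     out = []
--     for length in sorted(buckets):
--         for item in sorted(buckets[length], key=lambda kv: kv[0]):
--             out.append(item)
--     return out
-- ===== Notes on version B (the rewrite author's own statement) =====
-- stated objective: faster
-- what changed: Replaces A's O(n^2) in-place index-swapping bubble sort with a bucket index grouping items by value length, then emits buckets in ascending length order, each bucket sorted by key.
import Mathlib
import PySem

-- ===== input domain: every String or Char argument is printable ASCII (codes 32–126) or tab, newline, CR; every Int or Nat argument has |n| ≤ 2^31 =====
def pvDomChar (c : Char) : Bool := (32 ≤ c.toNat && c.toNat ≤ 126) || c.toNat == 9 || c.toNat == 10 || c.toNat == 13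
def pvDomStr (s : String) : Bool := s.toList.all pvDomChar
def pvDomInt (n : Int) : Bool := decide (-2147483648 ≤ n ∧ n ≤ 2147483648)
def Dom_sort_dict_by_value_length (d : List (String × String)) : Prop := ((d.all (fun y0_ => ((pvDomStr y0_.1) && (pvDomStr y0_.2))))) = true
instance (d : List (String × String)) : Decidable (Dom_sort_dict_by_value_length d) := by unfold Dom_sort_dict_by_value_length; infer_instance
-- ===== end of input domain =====

-- B replaces A's index-swapping bubble sort with a length-bucket index (group items by value
-- length, then emit buckets in ascending length order, each bucket sorted by key): alternative
-- decomposition of the same (value-length, key) ordering.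

-- ===== PORT A =====
-- the comparison of A's if: len(items[j][1]) > len(items[j+1][1]) or (== and items[j][0] > items[j+1][0])
def pvGtA (a b : String × String) : Bool :=
  decide (PySem.Str.len a.2 > PySem.Str.len b.2) ||
  (decide (PySem.Str.len a.2 = PySem.Str.len b.2) && decide (a.1 > b.1))

-- one inner-loop body: the conditional swap of items[j] and items[j+1]
def pvSwapStep (its : List (String × String)) (j : Nat) : List (String × String) :=
  match its[j]?, its[j + 1]? with
  | some a, some b => if pvGtA a b then (its.set j b).set (j + 1) a else its
  | _, _ => its

def sort_dict_by_value_length (d : List (String × String)) : List (String × String) :=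
  let items := d
  let n := items.length
  (List.range n).foldl (fun its i => (List.range (n - i - 1)).foldl pvSwapStep its) items

-- ===== PORT B =====
-- buckets.setdefault(len(v), []).append((k, v))  ==  modify (len v) [] (· ++ [(k, v)])  (exact: the
-- default [] is installed at first occurrence and the item appended to the stored list)
def sort_dict_by_value_length_alt (d : List (String × String)) : List (String × String) :=
  let buckets : PySem.Dict Int (List (String × String)) :=
    d.foldl (fun bk p => bk.modify (PySem.Str.len p.2) [] (fun l => l ++ [p])) PySem.Dict.empty
  (PySem.List.sorted buckets.keys (fun x => x) false).foldl
    (fun out L =>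
      (PySem.List.sorted (buckets.getD L []) (fun kv => kv.1) false).foldl
        (fun out item => out ++ [item]) out)
    []

-- ===== PRECONDITION & SPEC =====
-- Pre_ excludes association lists with duplicate keys: A's argument is a Python dict, whose keys
-- are necessarily distinct, so such lists do not encode any input A can be called on.
def Pre_sort_dict_by_value_length (d : List (String × String)) : Prop :=
  (d.map Prod.fst).Nodup
instance (d : List (String × String)) : Decidable (Pre_sort_dict_by_value_length d) := by
  unfold Pre_sort_dict_by_value_length; infer_instance

def pvWitness_sort_dict_by_value_length : (List (String × String)) :=
  [("b", "xx"), ("a", "y"), ("c", "y")]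

def Spec_sort_dict_by_value_length (d : List (String × String)) (out : List (String × String)) : Prop := out = sort_dict_by_value_length_alt d
instance (d : List (String × String)) (out : List (String × String)) : Decidable (Spec_sort_dict_by_value_length d out) := by unfold Spec_sort_dict_by_value_length; infer_instance

-- ===== CLAIM (what is proved, stated in full; the proofs are below) =====
def Claim_equal_sort_dict_by_value_length : Prop := ∀ (d : List (String × String)), Dom_sort_dict_by_value_length d → Pre_sort_dict_by_value_length d → Spec_sort_dict_by_value_length d (sort_dict_by_value_length d)

-- ===== LEMMAS AND PROOFS =====

-- the sort key both programs order by: (length of value, key), compared lexicographically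
def pvKey (p : String × String) : Lex (Int × String) := toLex (PySem.Str.len p.2, p.1)

theorem pvGtA_iff (a b : String × String) : pvGtA a b = true ↔ pvKey b < pvKey a := by
  simp [pvGtA, pvKey, Prod.Lex.lt_iff, GT.gt]
  constructor
  · rintro (h | ⟨h1, h2⟩)
    · exact Or.inl h
    · exact Or.inr ⟨h1.symm, h2⟩
  · rintro (h | ⟨h1, h2⟩)
    · exact Or.inl h
    · exact Or.inr ⟨h1.symm, h2⟩

theorem pvGtA_eq_false_iff (a b : String × String) : pvGtA a b = false ↔ pvKey a ≤ pvKey b := by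
  rw [← not_lt, ← pvGtA_iff, Bool.not_eq_true, eq_comm]

-- ---- the structural single pass (carry formulation) ----
-- pvGoP c xs = (output so far, carried element) of one bubble pass starting with carry c
def pvGoP (c : String × String) : List (String × String) → List (String × String) × (String × String)
  | [] => ([], c)
  | x :: xs =>
    if pvGtA c x then
      let r := pvGoP c xs
      (x :: r.1, r.2)
    else
      let r := pvGoP x xs
      (c :: r.1, r.2)

def pvPass (l : List (String × String)) : List (String × String) :=
  match l with
  | [] => []
  | x :: xs => (pvGoP x xs).1 ++ [(pvGoP x xs).2]

theorem pvGoP_length (c : String × String) (xs : List (String × String)) :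
    (pvGoP c xs).1.length = xs.length := by
  induction xs generalizing c with
  | nil => simp [pvGoP]
  | cons x xs ih => by_cases h : pvGtA c x = true <;> simp [pvGoP, h, ih]

theorem pvGoP_perm (c : String × String) (xs : List (String × String)) :
    ((pvGoP c xs).1 ++ [(pvGoP c xs).2]).Perm (c :: xs) := by
  induction xs generalizing c with
  | nil => simp [pvGoP]
  | cons x xs ih =>
    by_cases h : pvGtA c x = true
    · simp only [pvGoP, h, if_pos]
      exact ((ih c).cons x).trans (List.Perm.swap _ _ _)
    · simp only [pvGoP, h, if_neg, Bool.not_eq_true]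
      exact (ih x).cons c

theorem pvGoP_carry_max (c : String × String) (xs : List (String × String)) :
    ∀ y ∈ c :: xs, pvKey y ≤ pvKey (pvGoP c xs).2 := by
  induction xs generalizing c with
  | nil => simp [pvGoP]
  | cons x xs ih =>
    intro y hy
    by_cases h : pvGtA c x = true
    · simp only [pvGoP, h, if_pos]
      rcases List.mem_cons.1 hy with he | hy'
      · rw [he]; exact ih c c List.mem_cons_self
      · rcases List.mem_cons.1 hy' with he | hy''
        · rw [he]
          exact le_trans (le_of_lt ((pvGtA_iff c x).1 h)) (ih c c List.mem_cons_self)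
        · exact ih c y (List.mem_cons_of_mem _ hy'')
    · rw [Bool.not_eq_true] at h
      simp only [pvGoP, h, Bool.false_eq_true, if_neg, not_false_iff]
      rcases List.mem_cons.1 hy with he | hy'
      · rw [he]
        exact le_trans ((pvGtA_eq_false_iff c x).1 h) (ih x x List.mem_cons_self)
      · exact ih x y hy'

theorem pvGoP_snoc (c y : String × String) (xs : List (String × String)) :
    pvGoP c (xs ++ [y]) =
      (if pvGtA (pvGoP c xs).2 y then ((pvGoP c xs).1 ++ [y], (pvGoP c xs).2)
       else ((pvGoP c xs).1 ++ [(pvGoP c xs).2], y)) := by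
  induction xs generalizing c with
  | nil => by_cases h : pvGtA c y = true <;> simp [pvGoP, h]
  | cons x xs ih =>
    by_cases h : pvGtA c x = true
    · simp only [List.cons_append, pvGoP, h, if_pos, ih c]
      by_cases h2 : pvGtA (pvGoP c xs).2 y = true <;> simp [h2]
    · simp only [List.cons_append, pvGoP, h, if_neg, Bool.not_eq_true, ih x]
      by_cases h2 : pvGtA (pvGoP x xs).2 y = true <;> simp [h2]

-- ---- the indexed inner loop is the structural pass on the (m+1)-prefix ----
theorem pvSet_append (o : List (String × String)) (a b : String × String) (t : List (String × String)) :
    (o ++ a :: t).set o.length b = o ++ b :: t := by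
  induction o with
  | nil => simp
  | cons x o ih => simp [ih]

theorem pvGet_append (o : List (String × String)) (a : String × String) (t : List (String × String)) :
    (o ++ a :: t)[o.length]? = some a := by
  rw [List.getElem?_append_right (le_refl _)]
  simp

theorem pvSwapStep_at (o : List (String × String)) (r y : String × String)
    (t : List (String × String)) :
    pvSwapStep (o ++ r :: y :: t) o.length =
      if pvGtA r y then o ++ y :: r :: t else o ++ r :: y :: t := by
  have hget1 : (o ++ r :: y :: t)[o.length]? = some r := pvGet_append o r (y :: t)
  have hget2 : (o ++ r :: y :: t)[o.length + 1]? = some y := by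
    have : o ++ r :: y :: t = (o ++ [r]) ++ y :: t := by simp
    rw [this]
    have hl : (o ++ [r]).length = o.length + 1 := by simp
    rw [← hl]
    exact pvGet_append (o ++ [r]) y t
  unfold pvSwapStep
  rw [hget1, hget2]
  by_cases hg : pvGtA r y = true
  · simp only [hg, if_pos]
    rw [pvSet_append o r y (y :: t)]
    have : o ++ y :: y :: t = (o ++ [y]) ++ y :: t := by simp
    rw [this]
    have hl : (o ++ [y]).length = o.length + 1 := by simp
    rw [← hl, pvSet_append (o ++ [y]) y r t]
    simp
  · rw [Bool.not_eq_true] at hg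
    simp [hg]

theorem pvPass_snoc (p y : String × String) (ps : List (String × String)) :
    pvPass ((p :: ps) ++ [y]) =
      if pvGtA (pvGoP p ps).2 y then (pvGoP p ps).1 ++ y :: [(pvGoP p ps).2]
      else (pvGoP p ps).1 ++ (pvGoP p ps).2 :: [y] := by
  show pvPass (p :: (ps ++ [y])) = _
  simp only [pvPass, pvGoP_snoc]
  by_cases hg : pvGtA (pvGoP p ps).2 y = true <;> simp [hg]

theorem pvInner_eq_pass (m : Nat) (its : List (String × String)) (h : m < its.length) :
    (List.range m).foldl pvSwapStep its = pvPass (its.take (m + 1)) ++ its.drop (m + 1) := by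
  induction m with
  | zero =>
    simp only [List.range_zero, List.foldl_nil]
    cases its with
    | nil => simp at h
    | cons x t => simp [pvPass, pvGoP]
  | succ m ih =>
    have hm : m < its.length := Nat.lt_of_succ_lt h
    rw [List.range_succ, List.foldl_append, List.foldl_cons, List.foldl_nil, ih hm]
    have hPlen : (its.take (m + 1)).length = m + 1 := by rw [List.length_take]; omega
    obtain ⟨p, ps, hps⟩ := List.exists_cons_of_ne_nil
      (by intro hnil; rw [hnil] at hPlen; simp at hPlen :
        its.take (m + 1) ≠ [])
    have hlen : ps.length = m := by rw [hps] at hPlen; simpa using hPlen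
    have hdrop : its.drop (m + 1) = its[m + 1] :: its.drop (m + 1 + 1) :=
      List.drop_eq_getElem_cons h
    have htake : its.take (m + 1 + 1) = its.take (m + 1) ++ [its[m + 1]] := by
      rw [List.take_add_one, List.getElem?_eq_getElem h]; rfl
    rw [hps, hdrop, htake, hps, pvPass, pvPass_snoc]
    have holen : (pvGoP p ps).1.length = m := by rw [pvGoP_length, hlen]
    generalize its[m + 1] = y
    generalize its.drop (m + 1 + 1) = D
    have hshape : (pvGoP p ps).1 ++ [(pvGoP p ps).2] ++ y :: D
        = (pvGoP p ps).1 ++ (pvGoP p ps).2 :: y :: D := by simp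
    rw [hshape, ← holen, pvSwapStep_at]
    by_cases hg : pvGtA (pvGoP p ps).2 y = true <;> simp [hg]

-- ---- the outer loop as repeated passes ----
def pvPasses : Nat → List (String × String) → List (String × String)
  | 0, l => l
  | c + 1, l => pvPasses c (pvPass (l.take (c + 1)) ++ l.drop (c + 1))

theorem pvPass_length (l : List (String × String)) : (pvPass l).length = l.length := by
  cases l with
  | nil => rfl
  | cons x xs => simp [pvPass, pvGoP_length]

theorem pvPass_perm (l : List (String × String)) : (pvPass l).Perm l := by
  cases l with
  | nil => exact List.Perm.refl _
  | cons x xs => exact pvGoP_perm x xs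

theorem pvOuter_eq_passes (n c : Nat) (l : List (String × String)) (hn : l.length = n) (hc : c ≤ n) :
    (List.range' (n - c) c).foldl (fun its i => (List.range (n - i - 1)).foldl pvSwapStep its) l
      = pvPasses c l := by
  induction c generalizing l with
  | zero => simp [pvPasses]
  | succ c ih =>
    simp only [List.range'_succ, List.foldl_cons]
    have h1 : n - (n - (c + 1)) - 1 = c := by omega
    have h2 : n - (c + 1) + 1 = n - c := by omega
    rw [h1, h2]
    have hcl : c < l.length := by omega
    rw [pvInner_eq_pass c l hcl, pvPasses]
    apply ih
    · rw [List.length_append, pvPass_length, List.length_take, List.length_drop]; omega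
    · omega

theorem pvA_eq_passes (d : List (String × String)) :
    sort_dict_by_value_length d = pvPasses d.length d := by
  have := pvOuter_eq_passes d.length d.length d rfl (le_refl _)
  simpa [sort_dict_by_value_length, List.range_eq_range'] using this

theorem pvPasses_perm (c : Nat) (l : List (String × String)) : (pvPasses c l).Perm l := by
  induction c generalizing l with
  | zero => exact List.Perm.refl _
  | succ c ih =>
    refine (ih _).trans (((pvPass_perm _).append_right _).trans ?_)
    rw [List.take_append_drop]

theorem pvPasses_sorted (c : Nat) (l : List (String × String)) (hc : c ≤ l.length)
    (hsep : ∀ x ∈ l.take c, ∀ y ∈ l.drop c, pvKey x ≤ pvKey y)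
    (hsorted : (l.drop c).Pairwise (fun a b => pvKey a ≤ pvKey b)) :
    (pvPasses c l).Pairwise (fun a b => pvKey a ≤ pvKey b) := by
  induction c generalizing l with
  | zero => simpa using hsorted
  | succ c ih =>
    rw [pvPasses]
    have hPlen : (l.take (c + 1)).length = c + 1 := by rw [List.length_take]; omega
    obtain ⟨p, ps, hps⟩ := List.exists_cons_of_ne_nil
      (by intro hnil; rw [hnil] at hPlen; simp at hPlen : l.take (c + 1) ≠ [])
    have holen : (pvGoP p ps).1.length = c := by
      rw [pvGoP_length]
      have := hPlen; rw [hps] at this; simpa using this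
    have hQ : pvPass (l.take (c + 1)) = (pvGoP p ps).1 ++ [(pvGoP p ps).2] := by
      rw [hps]; rfl
    have hmemP : ∀ x, x ∈ (pvGoP p ps).1 ++ [(pvGoP p ps).2] → x ∈ l.take (c + 1) := by
      intro x hx; rw [hps]; exact (pvGoP_perm p ps).mem_iff.1 hx
    have hcarry : (pvGoP p ps).2 ∈ l.take (c + 1) := hmemP _ (by simp)
    have hmax : ∀ x ∈ l.take (c + 1), pvKey x ≤ pvKey (pvGoP p ps).2 := by
      intro x hx; rw [hps] at hx; exact pvGoP_carry_max p ps x hx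
    have hshape : pvPass (l.take (c + 1)) ++ l.drop (c + 1)
        = (pvGoP p ps).1 ++ ((pvGoP p ps).2 :: l.drop (c + 1)) := by
      rw [hQ]; simp
    have htake : (pvPass (l.take (c + 1)) ++ l.drop (c + 1)).take c = (pvGoP p ps).1 := by
      rw [hshape, ← holen, List.take_left]
    have hdrop : (pvPass (l.take (c + 1)) ++ l.drop (c + 1)).drop c
        = (pvGoP p ps).2 :: l.drop (c + 1) := by
      rw [hshape, ← holen, List.drop_left]
    apply ih
    · rw [List.length_append, pvPass_length, List.length_take, List.length_drop]; omega
    · rw [htake, hdrop]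
      intro x hx y hy
      have hxP : x ∈ l.take (c + 1) := hmemP x (List.mem_append_left _ hx)
      rcases List.mem_cons.1 hy with he | hy'
      · rw [he]; exact hmax x hxP
      · exact hsep x hxP y hy'
    · rw [hdrop]
      exact List.pairwise_cons.2 ⟨fun y hy => hsep _ hcarry y hy, hsorted⟩

theorem pvA_pairwise_le (d : List (String × String)) :
    (sort_dict_by_value_length d).Pairwise (fun a b => pvKey a ≤ pvKey b) := by
  rw [pvA_eq_passes]
  exact pvPasses_sorted d.length d (le_refl _) (by simp) (by simp)

-- ---- strictness from distinct keys ----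
theorem pvKey_eq_fst (a b : String × String) (h : pvKey a = pvKey b) : a.1 = b.1 := by
  have := congrArg (fun x => (ofLex x).2) h
  simpa [pvKey] using this

theorem pvPairwise_lt_of_le_of_nodup (l : List (String × String))
    (hle : l.Pairwise (fun a b => pvKey a ≤ pvKey b)) (hnd : (l.map Prod.fst).Nodup) :
    l.Pairwise (fun a b => pvKey a < pvKey b) := by
  have hne : l.Pairwise (fun a b => a.1 ≠ b.1) := by
    simpa [List.Nodup, List.pairwise_map] using hnd
  exact (hle.and hne).imp (fun {a b} h =>
    lt_of_le_of_ne h.1 (fun he => h.2 (pvKey_eq_fst a b he)))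

theorem pvA_eq_sorted (d : List (String × String)) (hnd : (d.map Prod.fst).Nodup) :
    PySem.List.sorted d pvKey = sort_dict_by_value_length d := by
  apply PySem.List.sorted_eq_of_perm_of_pairwise_lt
  · rw [pvA_eq_passes]; exact pvPasses_perm _ _
  · refine pvPairwise_lt_of_le_of_nodup _ (pvA_pairwise_le d) ?_
    have hp : ((sort_dict_by_value_length d).map Prod.fst).Perm (d.map Prod.fst) := by
      rw [pvA_eq_passes]; exact (pvPasses_perm _ _).map _
    exact hp.nodup_iff.2 hnd

-- ---- B: the bucket build, characterised ----
theorem pvBuckets_getD (d : List (String × String)) (L : Int) :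
    (d.foldl (fun bk p => bk.modify (PySem.Str.len p.2) [] (fun l => l ++ [p]))
        (PySem.Dict.empty : PySem.Dict Int (List (String × String)))).getD L []
      = d.filter (fun p => PySem.Str.len p.2 == L) := by
  have hmap : d.foldl (fun bk p => bk.modify (PySem.Str.len p.2) [] (fun l => l ++ [p]))
        (PySem.Dict.empty : PySem.Dict Int (List (String × String)))
      = (d.map (fun p => (PySem.Str.len p.2, p))).foldl
          (fun bk q => bk.modify q.1 [] (fun l => l ++ [q.2])) PySem.Dict.empty := by
    rw [List.foldl_map]
  rw [hmap, PySem.Dict.getD_foldl_modify_append, List.filter_map]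
  simp [Function.comp_def]

theorem pvBuckets_keys (d : List (String × String)) :
    (d.foldl (fun bk p => bk.modify (PySem.Str.len p.2) [] (fun l => l ++ [p]))
        (PySem.Dict.empty : PySem.Dict Int (List (String × String)))).keys
      = PySem.Set.ofList (d.map (fun p => PySem.Str.len p.2)) := by
  rw [PySem.Dict.keys_foldl_modify_key d (fun p => PySem.Str.len p.2) []
        (fun _ p => (fun l => l ++ [p]))]
  simp [PySem.Set.update, PySem.Set.ofList_eq_foldl]

theorem pvB_eq_flatMap (d : List (String × String)) :
    sort_dict_by_value_length_alt d
      = (PySem.List.sorted (PySem.Set.ofList (d.map (fun p => PySem.Str.len p.2))) (fun x => x) false).flatMap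
          (fun L => PySem.List.sorted (d.filter (fun p => PySem.Str.len p.2 == L)) (fun kv => kv.1) false) := by
  simp only [sort_dict_by_value_length_alt, pvBuckets_keys, pvBuckets_getD,
    PySem.List.foldl_append_singleton]
  rw [PySem.List.foldl_append_eq_flatMap]
  simp

set_option maxHeartbeats 1000000 in
theorem pvFlatMap_filter_perm (ls : List Int) (d : List (String × String))
    (hnd : ls.Nodup) (hcov : ∀ p ∈ d, PySem.Str.len p.2 ∈ ls) :
    (ls.flatMap (fun L => d.filter (fun p => PySem.Str.len p.2 == L))).Perm d := by
  induction ls generalizing d with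
  | nil =>
    cases d with
    | nil => simp
    | cons p t => exact absurd (hcov p List.mem_cons_self) (List.not_mem_nil)
  | cons L rest ih =>
    rw [List.flatMap_cons]
    have hrest : ∀ L' ∈ rest, d.filter (fun p => PySem.Str.len p.2 == L')
        = (d.filter (fun p => !(PySem.Str.len p.2 == L))).filter
            (fun p => PySem.Str.len p.2 == L') := by
      intro L' hL'
      rw [List.filter_filter]
      apply List.filter_congr
      intro p hp
      have hne : L' ≠ L := by rintro rfl; exact (List.nodup_cons.1 hnd).1 hL'
      by_cases h' : PySem.Str.len p.2 = L'
      · have e1 : (PySem.Str.len p.2 == L') = true := beq_iff_eq.2 h'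
        have e2 : (PySem.Str.len p.2 == L) = false :=
          beq_eq_false_iff_ne.2 (by rw [h']; exact hne)
        rw [e1, e2]; rfl
      · have e1 : (PySem.Str.len p.2 == L') = false := beq_eq_false_iff_ne.2 h'
        rw [e1]; rfl
    have hcongr : rest.flatMap (fun L' => d.filter (fun p => PySem.Str.len p.2 == L'))
        = rest.flatMap (fun L' => (d.filter (fun p => !(PySem.Str.len p.2 == L))).filter
            (fun p => PySem.Str.len p.2 == L')) := by
      rw [List.flatMap_def, List.flatMap_def, List.map_congr_left hrest]
    rw [hcongr]
    have hcov' : ∀ p ∈ d.filter (fun p => !(PySem.Str.len p.2 == L)),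
        PySem.Str.len p.2 ∈ rest := by
      intro p hp
      have hpd := List.mem_of_mem_filter hp
      have hneq := List.of_mem_filter hp
      rcases List.mem_cons.1 (hcov p hpd) with he | h'
      · rw [he] at hneq; simp at hneq
      · exact h'
    have hperm := ih _ (List.nodup_cons.1 hnd).2 hcov'
    exact (hperm.append_left _).trans
      (List.filter_append_perm (fun p => PySem.Str.len p.2 == L) d)

theorem pvFlatMap_perm_pointwise {α : Type} (ls : List Int) (f g : Int → List α)
    (h : ∀ L, (f L).Perm (g L)) : (ls.flatMap f).Perm (ls.flatMap g) := by
  induction ls with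
  | nil => simp
  | cons L rest ih => simpa using (h L).append ih

theorem pvB_perm (d : List (String × String)) : (sort_dict_by_value_length_alt d).Perm d := by
  rw [pvB_eq_flatMap]
  refine (pvFlatMap_perm_pointwise _ _ _
    (fun L => PySem.List.sorted_perm _ _ _)).trans ?_
  apply pvFlatMap_filter_perm
  · exact ((PySem.List.sorted_perm _ _ _).nodup_iff).2
      (PySem.Set.nodup_ofList _)
  · intro p hp
    rw [PySem.List.mem_sorted, PySem.Set.mem_ofList]
    exact List.mem_map_of_mem hp

theorem pvB_pairwise_lt (d : List (String × String)) (hnd : (d.map Prod.fst).Nodup) :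
    (sort_dict_by_value_length_alt d).Pairwise (fun a b => pvKey a < pvKey b) := by
  rw [pvB_eq_flatMap, List.pairwise_flatMap]
  constructor
  · intro L _
    have hsub : (PySem.List.sorted (d.filter (fun p => PySem.Str.len p.2 == L))
          (fun kv => kv.1) false).Pairwise (fun a b => a.1 ≤ b.1) :=
      PySem.List.sorted_pairwise _ _
    have hnodup : ((PySem.List.sorted (d.filter (fun p => PySem.Str.len p.2 == L))
          (fun kv => kv.1) false).map Prod.fst).Nodup := by
      refine (((PySem.List.sorted_perm _ _ _).map Prod.fst).nodup_iff).2 ?_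
      exact hnd.sublist (List.filter_sublist.map Prod.fst)
    have hne : (PySem.List.sorted (d.filter (fun p => PySem.Str.len p.2 == L))
          (fun kv => kv.1) false).Pairwise (fun a b => a.1 ≠ b.1) := by
      simpa [List.Nodup, List.pairwise_map] using hnodup
    have hlen : ∀ p ∈ PySem.List.sorted (d.filter (fun p => PySem.Str.len p.2 == L))
          (fun kv => kv.1) false, PySem.Str.len p.2 = L := by
      intro p hp
      have := List.of_mem_filter ((PySem.List.mem_sorted _ _ _ _).1 hp)
      simpa using this
    refine (hsub.and hne).imp_of_mem ?_
    intro a b ha hb h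
    simp only [pvKey, Prod.Lex.lt_iff, ofLex_toLex]
    exact Or.inr ⟨by rw [hlen a ha, hlen b hb], lt_of_le_of_ne h.1 h.2⟩
  · refine (PySem.List.sorted_ofList_pairwise_lt _).imp ?_
    intro L1 L2 hlt x hx y hy
    have hx' : PySem.Str.len x.2 = L1 := by
      have := List.of_mem_filter ((PySem.List.mem_sorted _ _ _ _).1 hx); simpa using this
    have hy' : PySem.Str.len y.2 = L2 := by
      have := List.of_mem_filter ((PySem.List.mem_sorted _ _ _ _).1 hy); simpa using this
    simp only [pvKey, Prod.Lex.lt_iff, ofLex_toLex]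
    exact Or.inl (by rw [hx', hy']; exact hlt)

theorem pvB_eq_sorted (d : List (String × String)) (hnd : (d.map Prod.fst).Nodup) :
    PySem.List.sorted d pvKey = sort_dict_by_value_length_alt d :=
  PySem.List.sorted_eq_of_perm_of_pairwise_lt _ _ _ (pvB_perm d) (pvB_pairwise_lt d hnd)

-- ===== VERDICT (by name: the statement is the Claim_ definition above) =====
theorem sort_dict_by_value_length_spec : Claim_equal_sort_dict_by_value_length := by
  intro d _ hpre
  unfold Spec_sort_dict_by_value_length
  rw [← pvA_eq_sorted d hpre, ← pvB_eq_sorted d hpre]
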